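-- pv_equiv track=rewrite | github.com/Thrigger/advent_of_code | 2021/python/d17_1.py | get_y_heigth
-- ===== SOURCE A (Python) =====
-- def get_y_heigth(y, steps, ymin):
--     res = 0
--     top = 0
--     while steps > 0 or ymin <= res+y:
--         res += y
--         y -= 1
--         if res >= top:
--             top = res
--         steps -=1
--
--     return (top, res)
-- ===== SOURCE B (Python) =====
-- def get_y_heigth(y, steps, ymin):
--     # closed-form/binary-search re-implementation: position after k steps is
--     # f(k) = k*y - k*(k-1)//2; the loop stops at the first n >= max(steps,0)
--     # with f(n+1) < ymin.  Find n without simulating.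
--     def f(k):
--         return k * y - k * (k - 1) // 2
--
--     s0 = steps if steps > 0 else 0
--     if f(s0 + 1) < ymin:
--         n = s0
--     else:
--         # largest k with f(k) >= ymin, searched on the descending side
--         lo = y if y > s0 + 1 else s0 + 1
--         hi = lo + (f(lo) - ymin) + 2        # guaranteed f(hi) < ymin
--         while hi - lo > 1:
--             mid = (lo + hi) // 2
--             if ymin <= f(mid):
--                 lo = mid
--             else:
--                 hi = mid
--         n = lo
--
--     m = min(n, max(y, 1))                   # index of the peak reached
--     top = max(0, f(m))
--     return (top, f(n))
-- ===== Notes on version B (the rewrite author's own statement) =====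
-- stated objective: faster
-- what changed: Replaces A's step-by-step simulation of the trajectory with the closed form f(k)=k*y-k*(k-1)//2 for the position after k steps, locating the stopping index by an O(log) binary search on the descending side of the parabola and the peak by a min/max formula.
import Mathlib
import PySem

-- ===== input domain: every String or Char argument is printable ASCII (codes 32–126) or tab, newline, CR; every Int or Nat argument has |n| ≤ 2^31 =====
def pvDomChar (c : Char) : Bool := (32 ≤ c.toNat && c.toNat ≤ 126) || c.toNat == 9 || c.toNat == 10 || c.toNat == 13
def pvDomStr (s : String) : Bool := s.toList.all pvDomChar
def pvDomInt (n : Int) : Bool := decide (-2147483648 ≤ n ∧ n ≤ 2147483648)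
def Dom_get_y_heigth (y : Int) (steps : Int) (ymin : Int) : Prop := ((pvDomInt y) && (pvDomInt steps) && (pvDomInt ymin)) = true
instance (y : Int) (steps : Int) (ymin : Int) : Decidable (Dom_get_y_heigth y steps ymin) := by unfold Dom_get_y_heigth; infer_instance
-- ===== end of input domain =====

-- B replaces A's step-by-step simulation (O(steps + |trajectory|)) by the closed form
-- f(k) = k*y - k*(k-1)//2 for the position after k steps, locating the stopping index by
-- an O(log) binary search on the descending side of the parabola.
-- A returns a tuple (top, res); both ports return it as the list [top, res].

-- ===== PORT A =====
-- termination measure lemma for the while loop of A (cited by name in decreasing_by)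
theorem loopA_dec (y steps res ymin : Int) (h : 0 < steps ∨ ymin ≤ res + y) :
    (y - 1).toNat < y.toNat ∨
      ((y - 1).toNat = y.toNat ∧
        (steps - 1).toNat + (res + y + (y - 1) - ymin + 1).toNat < steps.toNat + (res + y - ymin + 1).toNat) := by
  by_cases hy : 0 < y
  · exact Or.inl ((Int.toNat_lt_toNat hy).mpr (by omega))
  · refine Or.inr ⟨by rw [Int.toNat_of_nonpos (by omega), Int.toNat_of_nonpos (by omega)], ?_⟩
    rcases h with hs | hr
    · exact Nat.add_lt_add_of_lt_of_le ((Int.toNat_lt_toNat hs).mpr (by omega))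
        (Int.toNat_le_toNat (by omega))
    · exact Nat.add_lt_add_of_le_of_lt (Int.toNat_le_toNat (by omega))
        ((Int.toNat_lt_toNat (by omega)).mpr (by omega))

-- the while loop of A, state (res, top); literal transliteration
def loopA (ymin y steps res top : Int) : List Int :=
  if h : 0 < steps ∨ ymin ≤ res + y then
    loopA ymin (y - 1) (steps - 1) (res + y)
      (if top ≤ res + y then res + y else top)
  else
    [top, res]
termination_by (y.toNat, steps.toNat + (res + y - ymin + 1).toNat)
decreasing_by
  simp only [Prod.lex_iff]
  exact loopA_dec y steps res ymin h

def get_y_heigth (y : Int) (steps : Int) (ymin : Int) : List Int :=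
  loopA ymin y steps 0 0

-- ===== PORT B =====
-- f(k) of Source B
def fB (y k : Int) : Int := k * y - PySem.Int.floordiv (k * (k - 1)) 2

-- termination measure lemmas for the binary-search loop (cited by name in decreasing_by)
theorem bsB_dec1 (lo hi : Int) (h : 1 < hi - lo) :
    (hi - PySem.Int.floordiv (lo + hi) 2).toNat < (hi - lo).toNat := by
  have h1 : lo + 1 ≤ PySem.Int.floordiv (lo + hi) 2 :=
    (PySem.Int.le_floordiv_iff_mul_le (by norm_num)).mpr (by omega)
  exact (Int.toNat_lt_toNat (by omega)).mpr (by omega)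

theorem bsB_dec2 (lo hi : Int) (h : 1 < hi - lo) :
    (PySem.Int.floordiv (lo + hi) 2 - lo).toNat < (hi - lo).toNat := by
  have h2 : PySem.Int.floordiv (lo + hi) 2 < hi :=
    (PySem.Int.floordiv_lt_iff_lt_mul (by norm_num)).mpr (by omega)
  exact (Int.toNat_lt_toNat (by omega)).mpr (by omega)

-- the binary-search while loop of Source B
def bsB (y ymin lo hi : Int) : Int :=
  if h : 1 < hi - lo then
    if ymin ≤ fB y (PySem.Int.floordiv (lo + hi) 2) then
      bsB y ymin (PySem.Int.floordiv (lo + hi) 2) hi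
    else
      bsB y ymin lo (PySem.Int.floordiv (lo + hi) 2)
  else lo
termination_by (hi - lo).toNat
decreasing_by
  · exact bsB_dec1 lo hi h
  · exact bsB_dec2 lo hi h

def get_y_heigth_alt (y : Int) (steps : Int) (ymin : Int) : List Int :=
  let s0 := if 0 < steps then steps else 0
  let n :=
    if fB y (s0 + 1) < ymin then s0
    else
      let lo := if s0 + 1 < y then y else s0 + 1
      let hi := lo + (fB y lo - ymin) + 2
      bsB y ymin lo hi
  let m := min n (max y 1)
  [max 0 (fB y m), fB y n]

-- ===== PRECONDITION & SPEC =====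
def Spec_get_y_heigth (y : Int) (steps : Int) (ymin : Int) (out : List Int) : Prop := out = get_y_heigth_alt y steps ymin
instance (y : Int) (steps : Int) (ymin : Int) (out : List Int) : Decidable (Spec_get_y_heigth y steps ymin out) := by unfold Spec_get_y_heigth; infer_instance

-- ===== CLAIM (what is proved, stated in full; the proofs are below) =====
def Claim_equal_get_y_heigth : Prop := ∀ (y : Int) (steps : Int) (ymin : Int), Dom_get_y_heigth y steps ymin → Spec_get_y_heigth y steps ymin (get_y_heigth y steps ymin)

-- ===== LEMMAS AND PROOFS =====

theorem fB_zero (y : Int) : fB y 0 = 0 := by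
  simp [fB, PySem.Int.floordiv]

theorem fB_step (y k : Int) : fB y (k + 1) = fB y k + (y - k) := by
  unfold fB
  rw [PySem.Int.floordiv_eq_ediv_of_pos (by norm_num),
      PySem.Int.floordiv_eq_ediv_of_pos (by norm_num)]
  rcases Int.even_mul_succ_self (k - 1) with ⟨m, hm⟩
  have h1 : (k + 1) * ((k + 1) - 1) = (m + m) + 2 * k := by
    rw [← hm]; ring
  have h2 : k * (k - 1) = m + m := by rw [← hm]; ring
  have h3 : (k + 1) * y = k * y + y := by ring
  rw [h1, h2, h3]
  omega

theorem fB_mono_up (y a b : Int) (hab : a ≤ b) (hb : b ≤ y + 1) : fB y a ≤ fB y b := by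
  induction b, hab using Int.le_induction with
  | base => exact le_refl _
  | succ n hn ih =>
      have := ih (by omega)
      rw [fB_step]
      omega

theorem fB_mono_down (y a b : Int) (ha : y ≤ a) (hab : a ≤ b) : fB y b ≤ fB y a := by
  induction b, hab using Int.le_induction with
  | base => exact le_refl _
  | succ n hn ih =>
      rw [fB_step]
      omega

theorem fB_drop (y lo : Int) (hlo : y ≤ lo) :
    ∀ t : ℕ, fB y (lo + 1 + t) ≤ fB y (lo + 1) - t := by
  intro t
  induction t with
  | zero => simp
  | succ t ih =>
      have h1 : lo + 1 + ((t : Int) + 1) = (lo + 1 + t) + 1 := by ring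
      push_cast
      rw [h1, fB_step]
      push_cast at ih
      omega

theorem bsB_spec (y ymin : Int) : ∀ lo hi, lo < hi → ymin ≤ fB y lo → fB y hi < ymin →
    lo ≤ bsB y ymin lo hi ∧ ymin ≤ fB y (bsB y ymin lo hi) ∧ fB y (bsB y ymin lo hi + 1) < ymin := by
  intro lo hi
  induction lo, hi using bsB.induct y ymin with
  | case1 lo hi h hmid ih =>
      intro _ hlo hhi
      rw [bsB, dif_pos h, if_pos hmid]
      have hb : lo < PySem.Int.floordiv (lo + hi) 2 ∧ PySem.Int.floordiv (lo + hi) 2 < hi := by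
        rw [PySem.Int.floordiv_eq_ediv_of_pos (by norm_num)]
        omega
      have := ih (by omega) hmid hhi
      exact ⟨by omega, this.2.1, this.2.2⟩
  | case2 lo hi h hmid ih =>
      intro _ hlo hhi
      rw [bsB, dif_pos h, if_neg hmid]
      have hb : lo < PySem.Int.floordiv (lo + hi) 2 ∧ PySem.Int.floordiv (lo + hi) 2 < hi := by
        rw [PySem.Int.floordiv_eq_ediv_of_pos (by norm_num)]
        omega
      push_neg at hmid
      exact ih (by omega) hlo (by omega)
  | case3 lo hi h =>
      intro hlh hlo hhi
      rw [bsB, dif_neg h]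
      have : hi = lo + 1 := by omega
      exact ⟨le_refl _, hlo, by rw [← this]; exact hhi⟩

-- the sequence of `top` values A's loop builds, from index k, d more iterations, current top t
def gmaxB (y : Int) (k : Int) (d : ℕ) (t : Int) : Int :=
  match d with
  | 0 => t
  | d + 1 => gmaxB y (k + 1) d (max t (fB y (k + 1)))

theorem gmaxB_le (y : Int) : ∀ (d : ℕ) (k t : Int),
    t ≤ gmaxB y k d t ∧ ∀ j, k + 1 ≤ j → j ≤ k + d → fB y j ≤ gmaxB y k d t := by
  intro d
  induction d with
  | zero => exact fun k t => ⟨le_refl _, fun j h1 h2 => by omega⟩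
  | succ d ih =>
      intro k t
      constructor
      · exact le_trans (le_max_left _ _) (ih (k + 1) (max t (fB y (k + 1)))).1
      · intro j h1 h2
        rcases eq_or_lt_of_le h1 with h | h
        · exact le_trans (h ▸ le_max_right _ _) (ih (k + 1) (max t (fB y (k + 1)))).1
        · exact (ih (k + 1) (max t (fB y (k + 1)))).2 j (by omega) (by push_cast; push_cast at h2; omega)

theorem gmaxB_cases (y : Int) : ∀ (d : ℕ) (k t : Int),
    gmaxB y k d t = t ∨ ∃ j, k + 1 ≤ j ∧ j ≤ k + d ∧ gmaxB y k d t = fB y j := by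
  intro d
  induction d with
  | zero => exact fun k t => Or.inl rfl
  | succ d ih =>
      intro k t
      rcases ih (k + 1) (max t (fB y (k + 1))) with h | ⟨j, h1, h2, h3⟩
      · unfold gmaxB
        rcases max_choice t (fB y (k + 1)) with hm | hm
        · exact Or.inl (by rw [h, hm])
        · exact Or.inr ⟨k + 1, le_refl _, by push_cast; omega, by rw [h, hm]⟩
      · exact Or.inr ⟨j, by omega, by push_cast; push_cast at h2; omega, by unfold gmaxB; exact h3⟩

theorem loopA_eq (y steps ymin n : Int) (hn : 0 ≤ n)
    (hstop1 : steps ≤ n) (hstop2 : fB y (n + 1) < ymin)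
    (hrun : ∀ j, 0 ≤ j → j < n → (0 < steps - j ∨ ymin ≤ fB y (j + 1))) :
    ∀ (d : ℕ) (t : Int), (d : Int) ≤ n →
      loopA ymin (y - (n - d)) (steps - (n - d)) (fB y (n - d)) t = [gmaxB y (n - d) d t, fB y n] := by
  intro d
  induction d with
  | zero =>
      intro t _
      simp only [Nat.cast_zero, sub_zero, gmaxB]
      rw [loopA, dif_neg]
      push_neg
      have := fB_step y n
      exact ⟨by omega, by omega⟩
  | succ d ih =>
      intro t hd
      push_cast at hd ⊢
      set k : Int := n - ((d : Int) + 1) with hk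
      have hkn : 0 ≤ k ∧ k < n := by omega
      have hcond : 0 < steps - k ∨ ymin ≤ fB y k + (y - k) := by
        have := hrun k hkn.1 hkn.2
        rw [fB_step] at this
        omega
      rw [loopA, dif_pos hcond]
      have e1 : y - k - 1 = y - (n - (d : Int)) := by omega
      have e2 : steps - k - 1 = steps - (n - (d : Int)) := by omega
      have e3 : fB y k + (y - k) = fB y (n - (d : Int)) := by
        rw [show n - (d : Int) = k + 1 by omega, fB_step]
      have e4 : (if t ≤ fB y k + (y - k) then fB y k + (y - k) else t) = max t (fB y (k + 1)) := by
        rw [← fB_step, max_def]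
      rw [e1, e2, e4, e3, ih (max t (fB y (k + 1))) (by omega)]
      rw [show n - (d : Int) = k + 1 by omega]
      rfl

theorem top_eq (y n : Int) (hn : 0 ≤ n) :
    gmaxB y 0 n.toNat 0 = max 0 (fB y (min n (max y 1))) := by
  rcases eq_or_lt_of_le hn with h0 | h0
  · have : n.toNat = 0 := by omega
    rw [this]
    have : min n (max y 1) = 0 := by omega
    rw [this, fB_zero]
    simp [gmaxB]
  · set m : Int := min n (max y 1) with hm
    have hm1 : 1 ≤ m ∧ m ≤ n := by
      constructor <;> · simp only [hm]; omega
    apply le_antisymm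
    · rcases gmaxB_cases y n.toNat 0 0 with h | ⟨j, h1, h2, h3⟩
      · rw [h]; exact le_max_left _ _
      · rw [h3]
        refine le_trans ?_ (le_max_right _ _)
        -- fB y j ≤ fB y m for 1 ≤ j ≤ n
        have hj : 1 ≤ j ∧ j ≤ n := by omega
        by_cases hy : 1 ≤ y
        · have hmy : m = min n y := by simp only [hm]; omega
          by_cases hjm : j ≤ m
          · exact fB_mono_up y j m hjm (by omega)
          · have hme : m = y := by
              rcases min_choice n y with hc | hc <;> omega
            exact hme ▸ fB_mono_down y y j (by omega) (by omega)
        · have hme : m = 1 := by simp only [hm]; omega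
          exact hme ▸ fB_mono_down y 1 j (by omega) hj.1
    · apply max_le
      · exact le_trans (le_refl _) (gmaxB_le y n.toNat 0 0).1
      · exact (gmaxB_le y n.toNat 0 0).2 m (by omega) (by omega)

-- A's loop equals B's formula for any n with the stopping-index properties
theorem main_eq (y steps ymin n : Int) (hn : 0 ≤ n)
    (hstop1 : steps ≤ n) (hstop2 : fB y (n + 1) < ymin)
    (hrun : ∀ j, 0 ≤ j → j < n → (0 < steps - j ∨ ymin ≤ fB y (j + 1))) :
    get_y_heigth y steps ymin = [max 0 (fB y (min n (max y 1))), fB y n] := by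
  have := loopA_eq y steps ymin n hn hstop1 hstop2 hrun n.toNat 0 (by omega)
  have hz : n - (n.toNat : Int) = 0 := by omega
  rw [hz, fB_zero] at this
  simp only [get_y_heigth, sub_zero] at this ⊢
  rw [this, top_eq y n hn]

-- explicit form of the alt port's let-chain (proof-side only)
def s0B (steps : Int) : Int := if 0 < steps then steps else 0
def loB (y steps : Int) : Int := if s0B steps + 1 < y then y else s0B steps + 1
def hiB (y steps ymin : Int) : Int := loB y steps + (fB y (loB y steps) - ymin) + 2
def nB (y steps ymin : Int) : Int :=
  if fB y (s0B steps + 1) < ymin then s0B steps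
  else bsB y ymin (loB y steps) (hiB y steps ymin)

theorem alt_unfold (y steps ymin : Int) :
    get_y_heigth_alt y steps ymin =
      [max 0 (fB y (min (nB y steps ymin) (max y 1))), fB y (nB y steps ymin)] := rfl

-- ===== VERDICT (by name: the statement is the Claim_ definition above) =====
theorem get_y_heigth_spec : Claim_equal_get_y_heigth := by
  intro y steps ymin _
  unfold Spec_get_y_heigth
  rw [alt_unfold]
  have hs0 : 0 ≤ s0B steps ∧ steps ≤ s0B steps := by unfold s0B; split <;> omega
  by_cases h1 : fB y (s0B steps + 1) < ymin
  · simp only [nB, if_pos h1]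
    refine main_eq y steps ymin (s0B steps) hs0.1 hs0.2 h1 ?_
    intro j hj0 hjn
    left
    unfold s0B at hjn
    split at hjn <;> omega
  · simp only [nB, if_neg h1]
    push_neg at h1
    have hylo : y ≤ loB y steps ∧ s0B steps + 1 ≤ loB y steps := by
      unfold loB; split <;> omega
    have hflo : ymin ≤ fB y (loB y steps) := by
      unfold loB
      split
      · exact le_trans h1 (fB_mono_up y (s0B steps + 1) y (by omega) (by omega))
      · exact h1
    have hfhi : fB y (hiB y steps ymin) < ymin := by
      have ht : hiB y steps ymin = loB y steps + 1 + ((fB y (loB y steps) - ymin + 1).toNat : Int) := by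
        unfold hiB; omega
      have hdrop := fB_drop y (loB y steps) hylo.1 (fB y (loB y steps) - ymin + 1).toNat
      have hstep := fB_step y (loB y steps)
      rw [ht]
      omega
    have hlh : loB y steps < hiB y steps ymin := by unfold hiB; omega
    obtain ⟨hb1, hb2, hb3⟩ := bsB_spec y ymin (loB y steps) (hiB y steps ymin) hlh hflo hfhi
    refine main_eq y steps ymin (bsB y ymin (loB y steps) (hiB y steps ymin)) (by omega) (by omega) hb3 ?_
    intro j hj0 hjn
    by_cases hjs : j < steps
    · left; omega
    · right
      have hjs0 : s0B steps ≤ j := by unfold s0B; split <;> omega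
      by_cases hc : j + 1 ≤ y + 1
      · exact le_trans h1 (fB_mono_up y (s0B steps + 1) (j + 1) (by omega) hc)
      · exact le_trans hb2
          (fB_mono_down y (j + 1) (bsB y ymin (loB y steps) (hiB y steps ymin)) (by omega) (by omega))
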